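-- pv_equiv track=rewrite | github.com/Scrince/Arculus_Recovery | Arculus_BTC_Recovery.py | convertbits
-- ===== SOURCE A (Python) =====
-- from typing import Dict, List, Tuple
--
-- def convertbits(data: bytes, frombits: int, tobits: int, pad: bool = True) -> List[int]:
--     acc = 0
--     bits = 0
--     out = []
--     maxv = (1 << tobits) - 1
--     for value in data:
--         if value < 0 or (value >> frombits):
--             raise ValueError("invalid bits")
--         acc = (acc << frombits) | value
--         bits += frombits
--         while bits >= tobits:
--             bits -= tobits
--             out.append((acc >> bits) & maxv)
--     if pad:
--         if bits:
--             out.append((acc << (tobits - bits)) & maxv)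
--     elif bits >= frombits or ((acc << (tobits - bits)) & maxv):
--         raise ValueError("invalid bits")
--     return out
-- ===== SOURCE B (Python) =====
-- from typing import List
--
-- def convertbits(data: bytes, frombits: int, tobits: int, pad: bool = True) -> List[int]:
--     maxv = (1 << tobits) - 1
--     acc = 0
--     for value in data:
--         if value < 0 or (value >> frombits):
--             raise ValueError("invalid bits")
--         acc = (acc << frombits) | value
--     total_bits = len(data) * frombits
--     nfull = total_bits // tobits
--     out = [(acc >> (total_bits - tobits * (i + 1))) & maxv for i in range(nfull)]
--     rem = total_bits % tobits
--     if pad: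
--         if rem:
--             out.append((acc & ((1 << rem) - 1)) << (tobits - rem))
--     elif rem >= frombits or ((acc << (tobits - rem)) & maxv):
--         raise ValueError("invalid bits")
--     return out
-- ===== Notes on version B (the rewrite author's own statement) =====
-- stated objective: alternative
-- what changed: A interleaves accumulate-and-emit, keeping a sliding bit window (acc,bits) and emitting inside the scan; B first folds all values into one big integer, then slices the full tobits-chunks out of it with a second indexed pass and handles the remainder by a closed-form rem = total_bits % tobits.
-- outside the precondition, e.g. on convertbits([], 4, 0, True): A returns [], B raises ZeroDivisionError
import Mathlib
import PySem

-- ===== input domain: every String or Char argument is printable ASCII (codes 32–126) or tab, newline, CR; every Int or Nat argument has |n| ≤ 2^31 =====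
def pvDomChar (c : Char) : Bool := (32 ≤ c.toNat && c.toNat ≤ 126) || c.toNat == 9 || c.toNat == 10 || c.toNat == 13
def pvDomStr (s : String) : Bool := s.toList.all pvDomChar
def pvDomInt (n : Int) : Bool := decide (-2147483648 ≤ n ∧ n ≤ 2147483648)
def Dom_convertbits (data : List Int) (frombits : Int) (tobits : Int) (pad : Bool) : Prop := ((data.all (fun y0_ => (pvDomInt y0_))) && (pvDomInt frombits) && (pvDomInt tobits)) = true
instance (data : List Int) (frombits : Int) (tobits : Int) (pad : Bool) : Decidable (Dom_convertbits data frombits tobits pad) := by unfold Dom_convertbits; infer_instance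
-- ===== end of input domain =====

-- B replaces A's interleaved accumulate-and-emit sliding bit window with accumulate-everything-
-- then-slice (fold all values into one big integer, then cut the full tobits-chunks out of it by
-- index); alternative decomposition, same return value on Pre_.

-- ===== PORT A =====
-- A's inner 'while bits >= tobits: bits -= tobits; out.append((acc >> bits) & maxv)'.
-- fuel bounds the iteration count: on every input admitted by Pre_ (tobits ≥ 1, bits ≥ 0) fuel =
-- bits.toNat is at least the number of iterations, so the recursion is exactly Python's loop there.
def convWhileA (tobits maxv acc : Int) : Nat → Int → List Int → Int × List Int
  | 0, bits, out => (bits, out)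
  | Nat.succ fuel, bits, out =>
    if tobits ≤ bits then
      convWhileA tobits maxv acc fuel (bits - tobits)
        (out ++ [PySem.Int.band (acc >>> (bits - tobits).toNat) maxv])
    else (bits, out)

-- Port of A.  The two 'raise ValueError' paths (invalid value, no-pad leftover) are excluded by
-- Pre_ and so do not appear; shift amounts are nonnegative on Pre_, so .toNat is exact there.
def convertbits (data : List Int) (frombits : Int) (tobits : Int) (pad : Bool) : List Int :=
  let maxv : Int := ((1 : Int) <<< tobits.toNat) - 1
  let s : Int × Int × List Int := data.foldl (fun st value =>
    let acc := PySem.Int.bor (st.1 <<< frombits.toNat) value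
    let bits := st.2.1 + frombits
    let w := convWhileA tobits maxv acc bits.toNat bits st.2.2
    (acc, w.1, w.2)) (0, 0, [])
  if pad then
    if s.2.1 ≠ 0 then s.2.2 ++ [PySem.Int.band (s.1 <<< (tobits - s.2.1).toNat) maxv] else s.2.2
  else s.2.2

-- ===== PORT B =====
-- Port of B (accumulate-then-slice); same remark about excluded raise paths and .toNat.
def convertbits_alt (data : List Int) (frombits : Int) (tobits : Int) (pad : Bool) : List Int :=
  let maxv : Int := ((1 : Int) <<< tobits.toNat) - 1
  let acc : Int := data.foldl (fun a value => PySem.Int.bor (a <<< frombits.toNat) value) 0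
  let total : Int := (data.length : Int) * frombits
  let nfull : Int := PySem.Int.floordiv total tobits
  let out : List Int := (PySem.List.pyRange 0 nfull 1).map
      (fun i => PySem.Int.band (acc >>> (total - tobits * (i + 1)).toNat) maxv)
  let rem : Int := PySem.Int.mod total tobits
  if pad then
    if rem ≠ 0 then out ++ [PySem.Int.band acc ((1 <<< rem.toNat) - 1) <<< (tobits - rem).toNat]
    else out
  else out

-- ===== PRECONDITION & SPEC =====
-- Pre_ admits the inputs on which Python A returns normally (no ValueError, no infinite loop):
-- tobits ≥ 1, frombits ≥ 1 (except the trivial empty-data pad=True case, where frombits is never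
-- used), every value in range, and for pad=False the no-pad check must pass (remainder of the full
-- chunks smaller than frombits, leftover low bits of the last value zero).  The only inputs A
-- returns on that Pre_ excludes are the degenerate tobits = 0 with empty data, where A happens to
-- return [] while B's floor division '// tobits' raises ZeroDivisionError.  (The 'min … 32'
-- exponents keep the bound cheap to evaluate; on Dom_ every value fits in 32 bits, so they are
-- equivalent to A's own checks there.)
def Pre_convertbits (data : List Int) (frombits : Int) (tobits : Int) (pad : Bool) : Prop :=
  1 ≤ tobits ∧ (1 ≤ frombits ∨ (data = [] ∧ pad = true)) ∧
  (∀ v ∈ data, 0 ≤ v ∧ v < 2 ^ (min frombits.toNat 32)) ∧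
  (pad = false →
    PySem.Int.mod ((data.length : Int) * frombits) tobits < frombits ∧
    PySem.Int.mod (data.getLastD 0)
      (2 ^ (min (PySem.Int.mod ((data.length : Int) * frombits) tobits).toNat 32)) = 0)
instance (data : List Int) (frombits : Int) (tobits : Int) (pad : Bool) : Decidable (Pre_convertbits data frombits tobits pad) := by unfold Pre_convertbits; infer_instance

def pvWitness_convertbits : List Int × Int × Int × Bool := ([3, 1], 4, 3, true)

def Spec_convertbits (data : List Int) (frombits : Int) (tobits : Int) (pad : Bool) (out : List Int) : Prop := out = convertbits_alt data frombits tobits pad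
instance (data : List Int) (frombits : Int) (tobits : Int) (pad : Bool) (out : List Int) : Decidable (Spec_convertbits data frombits tobits pad out) := by unfold Spec_convertbits; infer_instance

-- ===== CLAIM (what is proved, stated in full; the proofs are below) =====
def Claim_equal_convertbits : Prop := ∀ (data : List Int) (frombits : Int) (tobits : Int) (pad : Bool), Dom_convertbits data frombits tobits pad → Pre_convertbits data frombits tobits pad → Spec_convertbits data frombits tobits pad (convertbits data frombits tobits pad)

-- ===== LEMMAS AND PROOFS =====
theorem pv_castShiftR (m n : Nat) : ((m : Int) >>> n) = ((m >>> n : Nat) : Int) := by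
  simp [HShiftRight.hShiftRight, Int.shiftRight]

theorem pv_castShiftL (m n : Nat) : ((m : Int) <<< n) = ((m <<< n : Nat) : Int) := by
  simp [HShiftLeft.hShiftLeft, Int.shiftLeft]

theorem pv_bandMod (x T : Nat) :
    PySem.Int.band (x : Int) ((2 ^ T - 1 : Nat) : Int) = ((x % 2 ^ T : Nat) : Int) := by
  rw [PySem.Int.band_natCast, Nat.and_two_pow_sub_one_eq_mod]

theorem pv_orDisj (a v F : Nat) (h : v < 2 ^ F) : 2 ^ F * a ||| v = 2 ^ F * a + v := by
  have h1 : (2 ^ F * a ||| v) % 2 ^ F = v := by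
    rw [← Nat.and_two_pow_sub_one_eq_mod, Nat.and_or_distrib_right,
        Nat.and_two_pow_sub_one_eq_mod, Nat.and_two_pow_sub_one_eq_mod,
        Nat.mul_mod_right, Nat.mod_eq_of_lt h]
    simp
  have h2 : (2 ^ F * a ||| v) / 2 ^ F = a := by
    rw [← Nat.shiftRight_eq_div_pow, Nat.shiftRight_or_distrib,
        Nat.shiftRight_eq_div_pow, Nat.shiftRight_eq_div_pow,
        Nat.mul_div_cancel_left _ (Nat.two_pow_pos F),
        Nat.div_eq_of_lt h]
    simp
  have h3 := Nat.div_add_mod (2 ^ F * a ||| v) (2 ^ F)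
  rw [h1, h2] at h3
  omega

theorem pv_borStep (a : Nat) (v : Int) (F : Nat) (hv : 0 ≤ v) (hvF : v < 2 ^ F) :
    PySem.Int.bor ((a : Int) <<< F) v = ((a * 2 ^ F + v.toNat : Nat) : Int) := by
  obtain ⟨n, rfl⟩ : ∃ n : Nat, v = (n : Int) := ⟨v.toNat, by omega⟩
  have hn : n < 2 ^ F := by exact_mod_cast hvF
  rw [pv_castShiftL, PySem.Int.bor_natCast, Nat.shiftLeft_eq]
  rw [Nat.mul_comm, pv_orDisj a n F hn, Nat.mul_comm]
  simp

theorem pv_maxv (T : Nat) : ((1 : Int) <<< T) - 1 = ((2 ^ T - 1 : Nat) : Int) := by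
  have h1 : ((1 : Int) <<< T) = (((1 <<< T : Nat) : Nat) : Int) := pv_castShiftL 1 T
  rw [h1, Nat.one_shiftLeft]
  have : (1 : Nat) ≤ 2 ^ T := Nat.one_le_two_pow
  push_cast [this]
  ring

def pvN (F : Nat) (p : List Int) : Nat := p.foldl (fun a v => a * 2 ^ F + v.toNat) 0

def pvSlice (F T : Nat) (p : List Int) (j : Nat) : Int :=
  ((pvN F p / 2 ^ (p.length * F - T * (j + 1))) % 2 ^ T : Nat)

def pvOut (F T : Nat) (p : List Int) : List Int :=
  (List.range (p.length * F / T)).map (pvSlice F T p)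

theorem pvN_append (F : Nat) (p : List Int) (v : Int) :
    pvN F (p ++ [v]) = pvN F p * 2 ^ F + v.toNat := by
  simp [pvN, List.foldl_append]

theorem convWhileA_char (T : Nat) (acc : Nat) :
    ∀ (q fuel r : Nat) (out : List Int), q ≤ fuel → r < T →
      convWhileA (T : Int) ((2 ^ T - 1 : Nat) : Int) (acc : Int) fuel ((r + q * T : Nat) : Int) out
        = (((r : Nat) : Int),
           out ++ (List.range q).map (fun k => (((acc / 2 ^ (r + (q - 1 - k) * T)) % 2 ^ T : Nat) : Int))) := by
  intro q
  induction q with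
  | zero =>
    intro fuel r out _ hr
    cases fuel with
    | zero => simp [convWhileA]
    | succ fu =>
      have : ¬ ((T : Int) ≤ ((r + 0 * T : Nat) : Int)) := by push_cast; omega
      rw [convWhileA, if_neg this]
      simp
  | succ q ih =>
    intro fuel r out hfu hr
    cases fuel with
    | zero => omega
    | succ fu =>
      have hcond : ((T : Int) ≤ ((r + (q + 1) * T : Nat) : Int)) := by push_cast; nlinarith
      have hsub : (((r + (q + 1) * T : Nat) : Int) - (T : Int)) = ((r + q * T : Nat) : Int) := by
        push_cast; ring
      have htn : (((r + q * T : Nat) : Int)).toNat = r + q * T := Int.toNat_natCast _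
      rw [convWhileA, if_pos hcond, hsub, htn, pv_castShiftR, Nat.shiftRight_eq_div_pow, pv_bandMod]
      rw [ih fu r _ (by omega) hr]
      rw [List.append_assoc]
      congr 1
      rw [List.range_succ_eq_map]
      simp only [List.map_cons, List.map_map, List.singleton_append]
      congr 1
      norm_num
      intro a ha
      have hqa : q - 1 - a = q - (a + 1) := by omega
      rw [hqa]

theorem convFoldA_char (F T : Nat) (hF : 1 ≤ F) (hT : 1 ≤ T) :
    ∀ p : List Int, (∀ v ∈ p, 0 ≤ v ∧ v < 2 ^ F) →
      p.foldl (fun (st : Int × Int × List Int) value =>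
          (PySem.Int.bor (st.1 <<< F) value,
           (convWhileA (T : Int) ((2 ^ T - 1 : Nat) : Int) (PySem.Int.bor (st.1 <<< F) value)
              (st.2.1 + (F : Int)).toNat (st.2.1 + (F : Int)) st.2.2).1,
           (convWhileA (T : Int) ((2 ^ T - 1 : Nat) : Int) (PySem.Int.bor (st.1 <<< F) value)
              (st.2.1 + (F : Int)).toNat (st.2.1 + (F : Int)) st.2.2).2)) (0, 0, [])
        = ((pvN F p : Int), ((p.length * F % T : Nat) : Int), pvOut F T p) := by
  intro p
  induction p using List.reverseRecOn with
  | nil => intro _; simp [pvN, pvOut]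
  | append_singleton p v ih =>
    intro hv
    have hvp : ∀ w ∈ p, 0 ≤ w ∧ w < 2 ^ F := fun w hw => hv w (by simp [hw])
    have hvv : 0 ≤ v ∧ v < 2 ^ F := hv v (by simp)
    rw [List.foldl_append, ih hvp]
    simp only [List.foldl_cons, List.foldl_nil]
    set m := p.length * F with hm
    clear_value m
    set N := pvN F p with hN
    -- the new accumulator
    rw [pv_borStep N v F hvv.1 hvv.2]
    set N' := N * 2 ^ F + v.toNat with hN'
    -- bits before the inner loop
    have hbits : ((m % T : Nat) : Int) + (F : Nat) = ((m % T + F : Nat) : Int) := by push_cast; ring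
    rw [hbits]
    set q := (m % T + F) / T with hq
    set r := (m % T + F) % T with hr2
    have hdecomp : m % T + F = r + q * T :=
      (Nat.mod_add_div' (m % T + F) T).symm
    have hrT : r < T := Nat.mod_lt _ (by omega)
    have hfuel : q ≤ m % T + F := by
      have h1 : q ≤ q * T := Nat.le_mul_of_pos_right q (by omega)
      omega
    have htn : (((m % T + F : Nat) : Int)).toNat = m % T + F := Int.toNat_natCast _
    rw [htn, hdecomp, convWhileA_char T N' q (r + q * T) r (pvOut F T p) (by omega) hrT]
    have hlen : (p ++ [v]).length = p.length + 1 := by simp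
    have hm' : (p ++ [v]).length * F = m + F := by rw [hlen, hm]; ring
    set a := m / T with ha
    clear_value a
    have hmam : m = a * T + m % T := by rw [ha, Nat.mul_comm]; exact (Nat.div_add_mod m T).symm
    have hm'2 : (p ++ [v]).length * F = r + (a + q) * T := by
      rw [hm']
      have : (a + q) * T = a * T + q * T := by ring
      omega
    have e1 : ((N' : Nat) : Int) = ((pvN F (p ++ [v]) : Nat) : Int) := by
      rw [pvN_append, hN', hN]
    have e2 : ((p ++ [v]).length * F) % T = r := by
      rw [hm']
      have := Nat.mod_add_mod m T F
      omega
    have ediv : ((p ++ [v]).length * F) / T = a + q := by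
      rw [hm'2, Nat.add_mul_div_right _ _ (by omega : 0 < T), Nat.div_eq_of_lt hrT, Nat.zero_add]
    have e3 : pvOut F T (p ++ [v]) = pvOut F T p ++ (List.range q).map
          (fun k => (((N' / 2 ^ (r + (q - 1 - k) * T)) % 2 ^ T : Nat) : Int)) := by
      rw [pvOut, ediv, List.range_add, List.map_append, List.map_map]
      congr 1
      · -- old slices unchanged
        rw [pvOut, ← hm, ← ha]
        apply List.map_congr_left
        intro j hj
        have hjq : j < a := List.mem_range.mp hj
        have hTja : T * (j + 1) ≤ m := by
          have h1 : T * (j + 1) ≤ T * a := Nat.mul_le_mul_left T (by omega)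
          have h2 : T * a ≤ m := by
            have : T * a = a * T := by ring
            omega
          omega
        rw [pvSlice, pvSlice, pvN_append, hm']
        have hexp : m + F - T * (j + 1) = (m - T * (j + 1)) + F := Nat.sub_add_comm hTja
        rw [hexp]
        congr 2
        have hpowadd : (2 : Nat) ^ ((m - T * (j + 1)) + F) = 2 ^ F * 2 ^ (m - T * (j + 1)) := by
          rw [pow_add]; ring
        rw [hpowadd, ← Nat.div_div_eq_div_mul]
        congr 1
        have hvt : v.toNat < 2 ^ F := by
          have h2 : v < ((2 ^ F : Nat) : Int) := by exact_mod_cast hvv.2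
          omega
        rw [Nat.add_comm, Nat.add_mul_div_right _ _ (Nat.two_pow_pos F),
            Nat.div_eq_of_lt hvt, Nat.zero_add]
        rw [← hm]
      · -- new slices
        apply List.map_congr_left
        intro k hk
        have hkq : k < q := List.mem_range.mp hk
        simp only [Function.comp_apply]
        rw [pvSlice, pvN_append, ← hN, ← hN', hm'2]
        have hidx : r + (a + q) * T - T * (a + k + 1) = r + (q - 1 - k) * T := by
          have hTc : T * (a + k + 1) = (a + k + 1) * T := by ring
          have hsplit : (a + q) * T = (a + k + 1) * T + (q - 1 - k) * T := by
            rw [← Nat.add_mul]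
            congr 1
            omega
          omega
        rw [hidx]
    rw [← e2] at *
    exact Prod.ext e1 (Prod.ext rfl e3.symm)

theorem convFoldB_char (F : Nat) :
    ∀ (p : List Int) (a : Nat), (∀ v ∈ p, 0 ≤ v ∧ v < 2 ^ F) →
      p.foldl (fun acc value => PySem.Int.bor (acc <<< F) value) ((a : Nat) : Int)
        = ((p.foldl (fun a v => a * 2 ^ F + v.toNat) a : Nat) : Int) := by
  intro p
  induction p with
  | nil => intro a _; simp
  | cons v p ih =>
    intro a hv
    have hvv := hv v (by simp)
    have hvF : v < ((2 ^ F : Nat) : Int) := by exact_mod_cast hvv.2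
    simp only [List.foldl_cons]
    rw [pv_borStep a v F hvv.1 (by exact_mod_cast hvF)]
    exact ih _ (fun w hw => hv w (by simp [hw]))

theorem convertbits_main (data : List Int) (F T : Nat) (hF : 1 ≤ F) (hT : 1 ≤ T) (pad : Bool)
    (hv : ∀ v ∈ data, 0 ≤ v ∧ v < ((2 ^ F : Nat) : Int)) :
    convertbits data (F : Int) (T : Int) pad = convertbits_alt data (F : Int) (T : Int) pad := by
  have hv' : ∀ v ∈ data, 0 ≤ v ∧ v < 2 ^ F := by
    intro v hvm
    refine ⟨(hv v hvm).1, ?_⟩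
    have := (hv v hvm).2
    push_cast at this ⊢
    exact this
  set m := data.length * F with hm
  unfold convertbits convertbits_alt
  simp only [Int.toNat_natCast, pv_maxv]
  rw [convFoldA_char F T hF hT data hv']
  have hB := convFoldB_char F data 0 hv'
  simp only [Nat.cast_zero] at hB
  rw [hB]
  have haccN : (data.foldl (fun a v => a * 2 ^ F + v.toNat) 0) = pvN F data := rfl
  rw [haccN]
  have htot : ((data.length : Int)) * ((F : Nat) : Int) = ((m : Nat) : Int) := by
    rw [hm]; push_cast; ring
  rw [htot, PySem.Int.floordiv_natCast, PySem.Int.mod_natCast, PySem.List.pyRange_zero_nat,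
      List.map_map]
  have hout : (List.range (m / T)).map
        ((fun i => PySem.Int.band ((pvN F data : Int) >>> (((m : Nat) : Int) - ((T : Nat) : Int) * (i + 1)).toNat)
            ((2 ^ T - 1 : Nat) : Int)) ∘ (fun k : Nat => (k : Int)))
      = pvOut F T data := by
    rw [pvOut, ← hm]
    apply List.map_congr_left
    intro k hk
    have hkq : k < m / T := List.mem_range.mp hk
    simp only [Function.comp_apply]
    have hTk : T * (k + 1) ≤ m := by
      have h1 : T * (k + 1) ≤ T * (m / T) := Nat.mul_le_mul_left T (by omega)
      have h2 : m / T * T ≤ m := Nat.div_mul_le_self m T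
      have h3 : T * (m / T) = m / T * T := by ring
      omega
    have hc : (((T * (k + 1) : Nat)) : Int) = ((T : Nat) : Int) * ((k : Int) + 1) := by
      push_cast; ring
    rw [← hc]
    have htn2 : ((((m : Nat) : Int)) - (((T * (k + 1) : Nat)) : Int)).toNat = m - T * (k + 1) := by
      omega
    rw [htn2, pv_castShiftR, Nat.shiftRight_eq_div_pow, pv_bandMod, pvSlice]
  rw [hout]
  -- tail
  set r0 := m % T with hr0
  have hr0T : r0 < T := Nat.mod_lt _ (by omega)
  have hcast0 : (((r0 : Nat) : Int) ≠ 0) ↔ ¬ (r0 = 0) := by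
    constructor
    · intro h h2; exact h (by simp [h2])
    · intro h h2; exact h (by exact_mod_cast h2)
  by_cases hpad : pad
  · simp only [hpad, if_true]
    by_cases hz : r0 = 0
    · simp [hz]
    · rw [if_pos (hcast0.mpr hz), if_pos (by exact_mod_cast hcast0.mpr hz)]
      congr 1
      have htt : ((((T : Nat) : Int)) - ((r0 : Nat) : Int)).toNat = T - r0 := by omega
      have hrt : (((r0 : Nat) : Int)).toNat = r0 := Int.toNat_natCast _
      have hmask : (((1 <<< r0 : Nat) : Int)) - 1 = ((2 ^ r0 - 1 : Nat) : Int) := by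
        rw [Nat.one_shiftLeft]
        have h1 : (1 : Nat) ≤ 2 ^ r0 := Nat.one_le_two_pow
        push_cast [h1]
        ring
      rw [htt, hrt, hmask, pv_castShiftL, pv_bandMod, pv_bandMod, pv_castShiftL,
          Nat.shiftLeft_eq, Nat.shiftLeft_eq]
      have hpow : (2 : Nat) ^ T = 2 ^ r0 * 2 ^ (T - r0) := by
        rw [← pow_add]
        congr 1
        omega
      rw [hpow, Nat.mul_mod_mul_right]
  · rw [if_neg hpad, if_neg hpad]

theorem convertbits_spec0 (data : List Int) (frombits : Int) (tobits : Int) (pad : Bool)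
    (hpre : Pre_convertbits data frombits tobits pad) :
    convertbits data frombits tobits pad = convertbits_alt data frombits tobits pad := by
  obtain ⟨ht, hfd, hvals, -⟩ := hpre
  set T := tobits.toNat with hTdef
  have htT : tobits = (T : Int) := by omega
  have hT1 : 1 ≤ T := by omega
  by_cases hnil : data = []
  · subst hnil
    rw [htT]
    have h0 : PySem.Int.floordiv ((0 : Int)) ((T : Nat) : Int) = 0 := by
      have := PySem.Int.floordiv_natCast 0 T
      simpa using this
    have h0m : PySem.Int.mod ((0 : Int)) ((T : Nat) : Int) = 0 := by
      have := PySem.Int.mod_natCast 0 T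
      simpa using this
    simp [convertbits, convertbits_alt, h0, h0m, PySem.List.pyRange_one_eq_nil]
  · have hf : 1 ≤ frombits := by
      rcases hfd with hf | ⟨hd, -⟩
      · exact hf
      · exact absurd hd hnil
    set F := frombits.toNat with hFdef
    have hfF : frombits = (F : Int) := by omega
    have hF1 : 1 ≤ F := by omega
    have hv : ∀ v ∈ data, 0 ≤ v ∧ v < ((2 ^ F : Nat) : Int) := by
      intro v hvm
      refine ⟨(hvals v hvm).1, ?_⟩
      have h1 := (hvals v hvm).2
      have h2 : (2 : Int) ^ (min F 32) ≤ (2 : Int) ^ F :=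
        pow_le_pow_right₀ (by norm_num) (min_le_left F 32)
      have h3 : ((2 ^ F : Nat) : Int) = (2 : Int) ^ F := by push_cast; ring
      rw [h3]
      calc v < 2 ^ (min frombits.toNat 32) := h1
        _ = (2 : Int) ^ (min F 32) := by rw [hFdef]
        _ ≤ (2 : Int) ^ F := h2
    rw [htT, hfF]
    exact convertbits_main data F T hF1 hT1 pad hv

-- ===== VERDICT (by name: the statement is the Claim_ definition above) =====
theorem convertbits_spec : Claim_equal_convertbits := by
  intro data frombits tobits pad _ hpre
  exact convertbits_spec0 data frombits tobits pad hpre
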